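-- pv_equiv track=rewrite | github.com/gracetownland/Legal-Aid-Tool | cdk/lambda/audioToText/src/main.py | customize_pii_markers
-- ===== SOURCE A (Python) =====
-- def customize_pii_markers(transcript_text):
--     """
--     Convert PII markers to custom format
--     e.g., [PII.NAME] -> [NAME], [PII.EMAIL] -> [EMAIL]
--     """
--     pii_replacements = {
--         '[PII.NAME]': '[NAME]',
--         '[PII.EMAIL]': '[EMAIL]',
--         '[PII.PHONE]': '[PHONE]',
--         '[PII.SSN]': '[SSN]',
--         '[PII.CREDIT_DEBIT_NUMBER]': '[CREDIT_CARD]',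
--         '[PII.BANK_ACCOUNT_NUMBER]': '[BANK_ACCOUNT]',
--         '[PII.ADDRESS]': '[ADDRESS]'
--     }
--
--     for pii_marker, custom_marker in pii_replacements.items():
--         transcript_text = transcript_text.replace(pii_marker, custom_marker)
--
--     return transcript_text
-- ===== SOURCE B (Python) =====
-- def customize_pii_markers(transcript_text):
--     """
--     Convert PII markers to custom format
--     e.g., [PII.NAME] -> [NAME], [PII.EMAIL] -> [EMAIL]
--     """
--     pii_replacements = [
--         ('[PII.NAME]', '[NAME]'),
--         ('[PII.EMAIL]', '[EMAIL]'),
--         ('[PII.PHONE]', '[PHONE]'),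
--         ('[PII.SSN]', '[SSN]'),
--         ('[PII.CREDIT_DEBIT_NUMBER]', '[CREDIT_CARD]'),
--         ('[PII.BANK_ACCOUNT_NUMBER]', '[BANK_ACCOUNT]'),
--         ('[PII.ADDRESS]', '[ADDRESS]'),
--     ]
--     out = []
--     i = 0
--     n = len(transcript_text)
--     while i < n:
--         for marker, custom in pii_replacements:
--             if transcript_text.startswith(marker, i):
--                 out.append(custom)
--                 i += len(marker)
--                 break
--         else:
--             out.append(transcript_text[i])
--             i += 1
--     return ''.join(out)
-- ===== Notes on version B (the rewrite author's own statement) =====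
-- stated objective: alternative
-- what changed: Replaces seven sequential full-text str.replace passes by a single left-to-right scan that, at each position, substitutes the first of the seven markers matching there (the markers are mutually prefix-free and their replacements introduce no new markers, so one pass gives the same result).
import Mathlib
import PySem

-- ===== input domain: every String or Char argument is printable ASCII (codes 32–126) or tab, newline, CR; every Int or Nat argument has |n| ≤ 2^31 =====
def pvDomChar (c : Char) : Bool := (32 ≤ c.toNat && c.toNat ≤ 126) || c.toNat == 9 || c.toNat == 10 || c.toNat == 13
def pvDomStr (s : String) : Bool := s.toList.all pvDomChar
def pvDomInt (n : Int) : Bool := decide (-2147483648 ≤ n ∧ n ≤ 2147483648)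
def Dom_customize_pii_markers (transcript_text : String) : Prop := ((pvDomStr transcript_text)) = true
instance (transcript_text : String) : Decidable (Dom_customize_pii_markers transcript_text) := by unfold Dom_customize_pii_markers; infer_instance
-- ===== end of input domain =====

-- B replaces A's seven sequential full-text str.replace passes by ONE left-to-right scan
-- substituting the first matching marker at each position; return values proved equal.

-- ===== PORT A =====
def customize_pii_markers (transcript_text : String) : String :=
  let t1 := PySem.Str.replace transcript_text "[PII.NAME]" "[NAME]"
  let t2 := PySem.Str.replace t1 "[PII.EMAIL]" "[EMAIL]"
  let t3 := PySem.Str.replace t2 "[PII.PHONE]" "[PHONE]"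
  let t4 := PySem.Str.replace t3 "[PII.SSN]" "[SSN]"
  let t5 := PySem.Str.replace t4 "[PII.CREDIT_DEBIT_NUMBER]" "[CREDIT_CARD]"
  let t6 := PySem.Str.replace t5 "[PII.BANK_ACCOUNT_NUMBER]" "[BANK_ACCOUNT]"
  let t7 := PySem.Str.replace t6 "[PII.ADDRESS]" "[ADDRESS]"
  t7

-- ===== PORT B =====
-- the (marker, custom) pair list of Source B, as char lists
def pvPairs : List (List Char × List Char) :=
  [("[PII.NAME]".toList, "[NAME]".toList),
   ("[PII.EMAIL]".toList, "[EMAIL]".toList),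
   ("[PII.PHONE]".toList, "[PHONE]".toList),
   ("[PII.SSN]".toList, "[SSN]".toList),
   ("[PII.CREDIT_DEBIT_NUMBER]".toList, "[CREDIT_CARD]".toList),
   ("[PII.BANK_ACCOUNT_NUMBER]".toList, "[BANK_ACCOUNT]".toList),
   ("[PII.ADDRESS]".toList, "[ADDRESS]".toList)]

-- the inner `for … break / else` of Source B: first pair whose marker matches here
def pvFindKey : List (List Char × List Char) → List Char → Option (List Char × Nat)
  | [], _ => none
  | (k, v) :: rest, l => if k.isPrefixOf l then some (v, k.length) else pvFindKey rest l

-- needed by the port's termination proof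
theorem pvFindKey_pos (l : List Char) (v : List Char) (n : Nat)
    (h : pvFindKey pvPairs l = some (v, n)) : 0 < n := by
  simp only [pvPairs, pvFindKey] at h
  split_ifs at h <;> simp_all <;> omega

-- the outer while-loop of Source B
def pvScan : List Char → List Char
  | [] => []
  | c :: t =>
    match h : pvFindKey pvPairs (c :: t) with
    | some (v, n) => v ++ pvScan (List.drop n (c :: t))
    | none => c :: pvScan t
termination_by l => l.length
decreasing_by
  · have := pvFindKey_pos _ _ _ h
    simp only [List.length_drop, List.length_cons]
    omega
  · simp

def customize_pii_markers_alt (transcript_text : String) : String :=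
  String.ofList (pvScan transcript_text.toList)

-- ===== PRECONDITION & SPEC =====
def Spec_customize_pii_markers (transcript_text : String) (out : String) : Prop := out = customize_pii_markers_alt transcript_text
instance (transcript_text : String) (out : String) : Decidable (Spec_customize_pii_markers transcript_text out) := by unfold Spec_customize_pii_markers; infer_instance

-- ===== CLAIM (what is proved, stated in full; the proofs are below) =====
def Claim_equal_customize_pii_markers : Prop := ∀ (transcript_text : String), Dom_customize_pii_markers transcript_text → Spec_customize_pii_markers transcript_text (customize_pii_markers transcript_text)

-- ===== LEMMAS AND PROOFS =====

-- marker tails (after the leading '[') and replacement tails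
def pvT1 : List Char := "PII.NAME]".toList
def pvT2 : List Char := "PII.EMAIL]".toList
def pvT3 : List Char := "PII.PHONE]".toList
def pvT4 : List Char := "PII.SSN]".toList
def pvT5 : List Char := "PII.CREDIT_DEBIT_NUMBER]".toList
def pvT6 : List Char := "PII.BANK_ACCOUNT_NUMBER]".toList
def pvT7 : List Char := "PII.ADDRESS]".toList
def pvW1 : List Char := "NAME]".toList
def pvW2 : List Char := "EMAIL]".toList
def pvW3 : List Char := "PHONE]".toList
def pvW4 : List Char := "SSN]".toList
def pvW5 : List Char := "CREDIT_CARD]".toList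
def pvW6 : List Char := "BANK_ACCOUNT]".toList
def pvW7 : List Char := "ADDRESS]".toList

-- A convenient non-accumulator form of PySem.Chars.replace (for a nonempty needle).
def pvRep (o : Char) (os nw : List Char) : List Char → List Char
  | [] => []
  | c :: t =>
    if (o :: os).isPrefixOf (c :: t) then nw ++ pvRep o os nw (List.drop (os.length + 1) (c :: t))
    else c :: pvRep o os nw t
termination_by l => l.length
decreasing_by
  · simp only [List.length_drop, List.length_cons]; omega
  · simp

theorem pvRep_go_spec (o : Char) (os nw : List Char) :
    ∀ (fuel : Nat) (l acc : List Char), l.length ≤ fuel →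
      PySem.Chars.replace.go (o :: os) nw fuel l acc = acc.reverse ++ pvRep o os nw l := by
  intro fuel
  induction fuel with
  | zero =>
    intro l acc hl
    have : l = [] := List.length_eq_zero_iff.mp (Nat.le_zero.mp hl)
    subst this
    simp [PySem.Chars.replace.go, pvRep]
  | succ f ih =>
    intro l acc hl
    cases l with
    | nil => simp [PySem.Chars.replace.go, pvRep]
    | cons c t =>
      rw [PySem.Chars.replace.go]
      by_cases hp : (o :: os).isPrefixOf (c :: t)
      · rw [if_pos hp]
        rw [ih _ _ (by simp at hl ⊢; omega)]
        rw [pvRep, if_pos hp]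
        simp
      · rw [if_neg hp]
        rw [ih _ _ (by simp at hl ⊢; omega)]
        rw [pvRep, if_neg hp]
        simp

theorem pvReplace_eq (l : List Char) (o : Char) (os nw : List Char) :
    PySem.Chars.replace l (o :: os) nw = pvRep o os nw l := by
  have := pvRep_go_spec o os nw l.length l [] le_rfl
  simpa [PySem.Chars.replace] using this

-- a prefix agrees with the longer list position by position
theorem pvPrefix_get {K L : List Char} (h : K <+: L) {p : Nat} (hp : p < K.length) :
    K[p]? = L[p]? := by
  obtain ⟨u, rfl⟩ := h
  rw [List.getElem?_append_left hp]

-- not a prefix because of a concrete mismatch at position p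
theorem pvNotPrefix_of_get (K L : List Char) (p : Nat) (hp : p < K.length)
    (h : K[p]? ≠ L[p]?) : ¬ K.isPrefixOf L := by
  intro hpre
  rw [List.isPrefixOf_iff_prefix] at hpre
  exact h (pvPrefix_get hpre hp)

-- a mismatch inside the literal block b :: X refutes the prefix regardless of u
theorem pvNPB (K : List Char) (b : Char) (X u : List Char) (p : Nat) (hp : p < K.length)
    (hpb : p < (b :: X).length) (hne : K[p]? ≠ (b :: X)[p]?) :
    ¬ K.isPrefixOf (b :: (X ++ u)) := by
  apply pvNotPrefix_of_get _ _ p hp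
  cases p with
  | zero => simpa using hne
  | succ q =>
    simp only [List.getElem?_cons_succ]
    simp only [List.length_cons, Nat.succ_lt_succ_iff] at hpb
    rw [List.getElem?_append_left hpb]
    simpa using hne

-- peel a bracket-headed, otherwise bracket-free block through a non-matching pvRep
theorem pvPeelBlock (K' nw : List Char) :
    ∀ (X : List Char), '[' ∉ X → ∀ (b : Char) (u : List Char),
      ¬ ('[' :: K').isPrefixOf (b :: (X ++ u)) →
      pvRep '[' K' nw (b :: (X ++ u)) = b :: (X ++ pvRep '[' K' nw u) := by
  intro X
  induction X with
  | nil =>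
    intro _ b u hb
    rw [pvRep, if_neg hb]
    simp
  | cons x X' ih =>
    intro hX b u hb
    have hx : x ≠ '[' := fun he => hX (by simp [he])
    have hX' : '[' ∉ X' := fun he => hX (by simp [he])
    rw [pvRep, if_neg hb]
    simp only [List.cons_append]
    rw [ih hX' x u (pvNotPrefix_of_get _ _ 0 (by simp) (by simpa using fun he => hx he.symm))]

theorem pvRep_match (o : Char) (os nw u : List Char) :
    pvRep o os nw (o :: (os ++ u)) = nw ++ pvRep o os nw u := by
  rw [pvRep]
  rw [if_pos (by rw [List.isPrefixOf_iff_prefix, List.cons_prefix_cons]; exact ⟨rfl, u, rfl⟩)]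
  congr 1
  rw [show o :: (os ++ u) = (o :: os) ++ u from rfl,
      show os.length + 1 = (o :: os).length from rfl, List.drop_left]

-- one non-matching step of pvRep
theorem pvPeelOne (K' nw : List Char) (c : Char) (t : List Char)
    (hb : ¬ ('[' :: K').isPrefixOf (c :: t)) :
    pvRep '[' K' nw (c :: t) = c :: pvRep '[' K' nw t := by
  rw [pvRep, if_neg hb]

-- pvRep with a '['-headed replacement: to any depth, the output either agrees with
-- the input or shows a '[' within
theorem pvRepTake (J W : List Char) :
    ∀ (u : List Char) (m : Nat),
      List.take m (pvRep '[' J ('[' :: W) u) = List.take m u ∨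
      ∃ p < m, (pvRep '[' J ('[' :: W) u)[p]? = some '[' := by
  intro u
  induction u with
  | nil => intro m; left; simp [pvRep]
  | cons c t ih =>
    intro m
    by_cases hp : ('[' :: J).isPrefixOf (c :: t)
    · cases m with
      | zero => left; simp
      | succ m' =>
        right
        refine ⟨0, by omega, ?_⟩
        rw [pvRep, if_pos hp]
        simp
    · rw [pvRep, if_neg hp]
      cases m with
      | zero => left; simp
      | succ m' =>
        rcases ih m' with h | ⟨p, hpm, hc⟩
        · left; simp [h]
        · right; exact ⟨p + 1, by omega, by simpa using hc⟩

-- stability: a non-matching '['-headed marker stays non-matching after a pvRep pass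
theorem pvStable (J W rest : List Char) (hrest : '[' ∉ rest) (u : List Char)
    (h : ¬ ('[' :: rest).isPrefixOf ('[' :: u)) :
    ¬ ('[' :: rest).isPrefixOf ('[' :: pvRep '[' J ('[' :: W) u) := by
  intro hpre
  apply h
  rw [List.isPrefixOf_iff_prefix] at hpre ⊢
  rw [List.cons_prefix_cons] at hpre ⊢
  refine ⟨rfl, ?_⟩
  obtain ⟨-, hpre⟩ := hpre
  rcases pvRepTake J W u rest.length with heq | ⟨p, hpm, hc⟩
  · have h1 : rest = List.take rest.length (pvRep '[' J ('[' :: W) u) :=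
      List.prefix_iff_eq_take.mp hpre
    rw [heq] at h1
    rw [h1]
    exact List.take_prefix _ _
  · exfalso
    apply hrest
    have h2 : rest[p]? = (pvRep '[' J ('[' :: W) u)[p]? := pvPrefix_get hpre hpm
    rw [hc] at h2
    exact List.mem_of_getElem? h2

-- the composed seven passes of A, in list form
def pvF (l : List Char) : List Char :=
  pvRep '[' pvT7 ('[' :: pvW7)
    (pvRep '[' pvT6 ('[' :: pvW6)
      (pvRep '[' pvT5 ('[' :: pvW5)
        (pvRep '[' pvT4 ('[' :: pvW4)
          (pvRep '[' pvT3 ('[' :: pvW3)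
            (pvRep '[' pvT2 ('[' :: pvW2)
              (pvRep '[' pvT1 ('[' :: pvW1) l))))))

theorem pvA_toList (t : String) :
    (customize_pii_markers t).toList = pvF t.toList := by
  simp only [customize_pii_markers, PySem.Str.toList_replace, pvF]
  rw [show "[PII.NAME]".toList = '[' :: pvT1 from rfl, pvReplace_eq,
      show "[PII.EMAIL]".toList = '[' :: pvT2 from rfl, pvReplace_eq,
      show "[PII.PHONE]".toList = '[' :: pvT3 from rfl, pvReplace_eq,
      show "[PII.SSN]".toList = '[' :: pvT4 from rfl, pvReplace_eq,
      show "[PII.CREDIT_DEBIT_NUMBER]".toList = '[' :: pvT5 from rfl, pvReplace_eq,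
      show "[PII.BANK_ACCOUNT_NUMBER]".toList = '[' :: pvT6 from rfl, pvReplace_eq,
      show "[PII.ADDRESS]".toList = '[' :: pvT7 from rfl, pvReplace_eq]
  rfl

theorem pvF_nil : pvF [] = [] := by
  simp [pvF, pvRep]

theorem pvScan_nil : pvScan [] = [] := by
  simp [pvScan]

theorem pvPairs_eq : pvPairs =
    [('[' :: pvT1, '[' :: pvW1), ('[' :: pvT2, '[' :: pvW2), ('[' :: pvT3, '[' :: pvW3),
     ('[' :: pvT4, '[' :: pvW4), ('[' :: pvT5, '[' :: pvW5), ('[' :: pvT6, '[' :: pvW6),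
     ('[' :: pvT7, '[' :: pvW7)] := rfl

theorem pvScan_eq_some (c : Char) (t v : List Char) (n : Nat)
    (h : pvFindKey pvPairs (c :: t) = some (v, n)) :
    pvScan (c :: t) = v ++ pvScan (List.drop n (c :: t)) := by
  rw [pvScan.eq_def]
  split
  · rename_i heq
    exact absurd heq (by simp)
  · rename_i c' t' heq
    injection heq with h1 h2
    subst h1; subst h2
    split
    · rename_i v' n' heq2
      rw [h] at heq2
      injection heq2 with heq2
      injection heq2 with ha hb
      rw [ha, hb]
    · rename_i heq2
      rw [h] at heq2
      exact absurd heq2 (by simp)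

theorem pvScan_eq_none (c : Char) (t : List Char)
    (h : pvFindKey pvPairs (c :: t) = none) :
    pvScan (c :: t) = c :: pvScan t := by
  rw [pvScan.eq_def]
  split
  · rename_i heq
    exact absurd heq (by simp)
  · rename_i c' t' heq
    injection heq with h1 h2
    subst h1; subst h2
    split
    · rename_i v' n' heq2
      rw [h] at heq2
      exact absurd heq2 (by simp)
    · rfl

theorem pvFind1 (u : List Char) :
    pvFindKey pvPairs ('[' :: (pvT1 ++ u)) = some ('[' :: pvW1, 10) := by
  rw [pvPairs_eq]
  simp only [pvFindKey]

  rw [if_pos (by rw [List.isPrefixOf_iff_prefix, List.cons_prefix_cons]; exact ⟨rfl, u, rfl⟩)]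
  decide

theorem pvStep1 (u : List Char) :
    pvF ('[' :: (pvT1 ++ u)) = '[' :: (pvW1 ++ pvF u) := by
  unfold pvF
  rw [pvRep_match]
  simp only [List.cons_append]
  rw [pvPeelBlock pvT2 ('[' :: pvW2) pvW1 (by decide) '[' _
        (pvNPB _ '[' pvW1 _ 1 (by decide) (by decide) (by decide))]
  rw [pvPeelBlock pvT3 ('[' :: pvW3) pvW1 (by decide) '[' _
        (pvNPB _ '[' pvW1 _ 1 (by decide) (by decide) (by decide))]
  rw [pvPeelBlock pvT4 ('[' :: pvW4) pvW1 (by decide) '[' _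
        (pvNPB _ '[' pvW1 _ 1 (by decide) (by decide) (by decide))]
  rw [pvPeelBlock pvT5 ('[' :: pvW5) pvW1 (by decide) '[' _
        (pvNPB _ '[' pvW1 _ 1 (by decide) (by decide) (by decide))]
  rw [pvPeelBlock pvT6 ('[' :: pvW6) pvW1 (by decide) '[' _
        (pvNPB _ '[' pvW1 _ 1 (by decide) (by decide) (by decide))]
  rw [pvPeelBlock pvT7 ('[' :: pvW7) pvW1 (by decide) '[' _
        (pvNPB _ '[' pvW1 _ 1 (by decide) (by decide) (by decide))]

theorem pvScanStep1 (u : List Char) :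
    pvScan ('[' :: (pvT1 ++ u)) = '[' :: (pvW1 ++ pvScan u) := by
  rw [pvScan_eq_some _ _ _ _ (pvFind1 u)]
  rw [show List.drop 10 ('[' :: (pvT1 ++ u)) = u from List.drop_left' (l₁ := '[' :: pvT1) (by decide)]
  rfl

theorem pvFind2 (u : List Char) :
    pvFindKey pvPairs ('[' :: (pvT2 ++ u)) = some ('[' :: pvW2, 11) := by
  rw [pvPairs_eq]
  simp only [pvFindKey]
  rw [if_neg (pvNPB _ '[' pvT2 _ 5 (by decide) (by decide) (by decide))]
  rw [if_pos (by rw [List.isPrefixOf_iff_prefix, List.cons_prefix_cons]; exact ⟨rfl, u, rfl⟩)]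
  decide

theorem pvStep2 (u : List Char) :
    pvF ('[' :: (pvT2 ++ u)) = '[' :: (pvW2 ++ pvF u) := by
  unfold pvF
  rw [pvPeelBlock pvT1 ('[' :: pvW1) pvT2 (by decide) '[' _
        (pvNPB _ '[' pvT2 _ 5 (by decide) (by decide) (by decide))]
  rw [pvRep_match]
  simp only [List.cons_append]
  rw [pvPeelBlock pvT3 ('[' :: pvW3) pvW2 (by decide) '[' _
        (pvNPB _ '[' pvW2 _ 1 (by decide) (by decide) (by decide))]
  rw [pvPeelBlock pvT4 ('[' :: pvW4) pvW2 (by decide) '[' _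
        (pvNPB _ '[' pvW2 _ 1 (by decide) (by decide) (by decide))]
  rw [pvPeelBlock pvT5 ('[' :: pvW5) pvW2 (by decide) '[' _
        (pvNPB _ '[' pvW2 _ 1 (by decide) (by decide) (by decide))]
  rw [pvPeelBlock pvT6 ('[' :: pvW6) pvW2 (by decide) '[' _
        (pvNPB _ '[' pvW2 _ 1 (by decide) (by decide) (by decide))]
  rw [pvPeelBlock pvT7 ('[' :: pvW7) pvW2 (by decide) '[' _
        (pvNPB _ '[' pvW2 _ 1 (by decide) (by decide) (by decide))]

theorem pvScanStep2 (u : List Char) :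
    pvScan ('[' :: (pvT2 ++ u)) = '[' :: (pvW2 ++ pvScan u) := by
  rw [pvScan_eq_some _ _ _ _ (pvFind2 u)]
  rw [show List.drop 11 ('[' :: (pvT2 ++ u)) = u from List.drop_left' (l₁ := '[' :: pvT2) (by decide)]
  rfl

theorem pvFind3 (u : List Char) :
    pvFindKey pvPairs ('[' :: (pvT3 ++ u)) = some ('[' :: pvW3, 11) := by
  rw [pvPairs_eq]
  simp only [pvFindKey]
  rw [if_neg (pvNPB _ '[' pvT3 _ 5 (by decide) (by decide) (by decide))]
  rw [if_neg (pvNPB _ '[' pvT3 _ 5 (by decide) (by decide) (by decide))]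
  rw [if_pos (by rw [List.isPrefixOf_iff_prefix, List.cons_prefix_cons]; exact ⟨rfl, u, rfl⟩)]
  decide

theorem pvStep3 (u : List Char) :
    pvF ('[' :: (pvT3 ++ u)) = '[' :: (pvW3 ++ pvF u) := by
  unfold pvF
  rw [pvPeelBlock pvT1 ('[' :: pvW1) pvT3 (by decide) '[' _
        (pvNPB _ '[' pvT3 _ 5 (by decide) (by decide) (by decide))]
  rw [pvPeelBlock pvT2 ('[' :: pvW2) pvT3 (by decide) '[' _
        (pvNPB _ '[' pvT3 _ 5 (by decide) (by decide) (by decide))]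
  rw [pvRep_match]
  simp only [List.cons_append]
  rw [pvPeelBlock pvT4 ('[' :: pvW4) pvW3 (by decide) '[' _
        (pvNPB _ '[' pvW3 _ 2 (by decide) (by decide) (by decide))]
  rw [pvPeelBlock pvT5 ('[' :: pvW5) pvW3 (by decide) '[' _
        (pvNPB _ '[' pvW3 _ 2 (by decide) (by decide) (by decide))]
  rw [pvPeelBlock pvT6 ('[' :: pvW6) pvW3 (by decide) '[' _
        (pvNPB _ '[' pvW3 _ 2 (by decide) (by decide) (by decide))]
  rw [pvPeelBlock pvT7 ('[' :: pvW7) pvW3 (by decide) '[' _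
        (pvNPB _ '[' pvW3 _ 2 (by decide) (by decide) (by decide))]

theorem pvScanStep3 (u : List Char) :
    pvScan ('[' :: (pvT3 ++ u)) = '[' :: (pvW3 ++ pvScan u) := by
  rw [pvScan_eq_some _ _ _ _ (pvFind3 u)]
  rw [show List.drop 11 ('[' :: (pvT3 ++ u)) = u from List.drop_left' (l₁ := '[' :: pvT3) (by decide)]
  rfl

theorem pvFind4 (u : List Char) :
    pvFindKey pvPairs ('[' :: (pvT4 ++ u)) = some ('[' :: pvW4, 9) := by
  rw [pvPairs_eq]
  simp only [pvFindKey]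
  rw [if_neg (pvNPB _ '[' pvT4 _ 5 (by decide) (by decide) (by decide))]
  rw [if_neg (pvNPB _ '[' pvT4 _ 5 (by decide) (by decide) (by decide))]
  rw [if_neg (pvNPB _ '[' pvT4 _ 5 (by decide) (by decide) (by decide))]
  rw [if_pos (by rw [List.isPrefixOf_iff_prefix, List.cons_prefix_cons]; exact ⟨rfl, u, rfl⟩)]
  decide

theorem pvStep4 (u : List Char) :
    pvF ('[' :: (pvT4 ++ u)) = '[' :: (pvW4 ++ pvF u) := by
  unfold pvF
  rw [pvPeelBlock pvT1 ('[' :: pvW1) pvT4 (by decide) '[' _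
        (pvNPB _ '[' pvT4 _ 5 (by decide) (by decide) (by decide))]
  rw [pvPeelBlock pvT2 ('[' :: pvW2) pvT4 (by decide) '[' _
        (pvNPB _ '[' pvT4 _ 5 (by decide) (by decide) (by decide))]
  rw [pvPeelBlock pvT3 ('[' :: pvW3) pvT4 (by decide) '[' _
        (pvNPB _ '[' pvT4 _ 5 (by decide) (by decide) (by decide))]
  rw [pvRep_match]
  simp only [List.cons_append]
  rw [pvPeelBlock pvT5 ('[' :: pvW5) pvW4 (by decide) '[' _
        (pvNPB _ '[' pvW4 _ 1 (by decide) (by decide) (by decide))]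
  rw [pvPeelBlock pvT6 ('[' :: pvW6) pvW4 (by decide) '[' _
        (pvNPB _ '[' pvW4 _ 1 (by decide) (by decide) (by decide))]
  rw [pvPeelBlock pvT7 ('[' :: pvW7) pvW4 (by decide) '[' _
        (pvNPB _ '[' pvW4 _ 1 (by decide) (by decide) (by decide))]

theorem pvScanStep4 (u : List Char) :
    pvScan ('[' :: (pvT4 ++ u)) = '[' :: (pvW4 ++ pvScan u) := by
  rw [pvScan_eq_some _ _ _ _ (pvFind4 u)]
  rw [show List.drop 9 ('[' :: (pvT4 ++ u)) = u from List.drop_left' (l₁ := '[' :: pvT4) (by decide)]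
  rfl

theorem pvFind5 (u : List Char) :
    pvFindKey pvPairs ('[' :: (pvT5 ++ u)) = some ('[' :: pvW5, 25) := by
  rw [pvPairs_eq]
  simp only [pvFindKey]
  rw [if_neg (pvNPB _ '[' pvT5 _ 5 (by decide) (by decide) (by decide))]
  rw [if_neg (pvNPB _ '[' pvT5 _ 5 (by decide) (by decide) (by decide))]
  rw [if_neg (pvNPB _ '[' pvT5 _ 5 (by decide) (by decide) (by decide))]
  rw [if_neg (pvNPB _ '[' pvT5 _ 5 (by decide) (by decide) (by decide))]
  rw [if_pos (by rw [List.isPrefixOf_iff_prefix, List.cons_prefix_cons]; exact ⟨rfl, u, rfl⟩)]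
  decide

theorem pvStep5 (u : List Char) :
    pvF ('[' :: (pvT5 ++ u)) = '[' :: (pvW5 ++ pvF u) := by
  unfold pvF
  rw [pvPeelBlock pvT1 ('[' :: pvW1) pvT5 (by decide) '[' _
        (pvNPB _ '[' pvT5 _ 5 (by decide) (by decide) (by decide))]
  rw [pvPeelBlock pvT2 ('[' :: pvW2) pvT5 (by decide) '[' _
        (pvNPB _ '[' pvT5 _ 5 (by decide) (by decide) (by decide))]
  rw [pvPeelBlock pvT3 ('[' :: pvW3) pvT5 (by decide) '[' _
        (pvNPB _ '[' pvT5 _ 5 (by decide) (by decide) (by decide))]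
  rw [pvPeelBlock pvT4 ('[' :: pvW4) pvT5 (by decide) '[' _
        (pvNPB _ '[' pvT5 _ 5 (by decide) (by decide) (by decide))]
  rw [pvRep_match]
  simp only [List.cons_append]
  rw [pvPeelBlock pvT6 ('[' :: pvW6) pvW5 (by decide) '[' _
        (pvNPB _ '[' pvW5 _ 1 (by decide) (by decide) (by decide))]
  rw [pvPeelBlock pvT7 ('[' :: pvW7) pvW5 (by decide) '[' _
        (pvNPB _ '[' pvW5 _ 1 (by decide) (by decide) (by decide))]

theorem pvScanStep5 (u : List Char) :
    pvScan ('[' :: (pvT5 ++ u)) = '[' :: (pvW5 ++ pvScan u) := by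
  rw [pvScan_eq_some _ _ _ _ (pvFind5 u)]
  rw [show List.drop 25 ('[' :: (pvT5 ++ u)) = u from List.drop_left' (l₁ := '[' :: pvT5) (by decide)]
  rfl

theorem pvFind6 (u : List Char) :
    pvFindKey pvPairs ('[' :: (pvT6 ++ u)) = some ('[' :: pvW6, 25) := by
  rw [pvPairs_eq]
  simp only [pvFindKey]
  rw [if_neg (pvNPB _ '[' pvT6 _ 5 (by decide) (by decide) (by decide))]
  rw [if_neg (pvNPB _ '[' pvT6 _ 5 (by decide) (by decide) (by decide))]
  rw [if_neg (pvNPB _ '[' pvT6 _ 5 (by decide) (by decide) (by decide))]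
  rw [if_neg (pvNPB _ '[' pvT6 _ 5 (by decide) (by decide) (by decide))]
  rw [if_neg (pvNPB _ '[' pvT6 _ 5 (by decide) (by decide) (by decide))]
  rw [if_pos (by rw [List.isPrefixOf_iff_prefix, List.cons_prefix_cons]; exact ⟨rfl, u, rfl⟩)]
  decide

theorem pvStep6 (u : List Char) :
    pvF ('[' :: (pvT6 ++ u)) = '[' :: (pvW6 ++ pvF u) := by
  unfold pvF
  rw [pvPeelBlock pvT1 ('[' :: pvW1) pvT6 (by decide) '[' _
        (pvNPB _ '[' pvT6 _ 5 (by decide) (by decide) (by decide))]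
  rw [pvPeelBlock pvT2 ('[' :: pvW2) pvT6 (by decide) '[' _
        (pvNPB _ '[' pvT6 _ 5 (by decide) (by decide) (by decide))]
  rw [pvPeelBlock pvT3 ('[' :: pvW3) pvT6 (by decide) '[' _
        (pvNPB _ '[' pvT6 _ 5 (by decide) (by decide) (by decide))]
  rw [pvPeelBlock pvT4 ('[' :: pvW4) pvT6 (by decide) '[' _
        (pvNPB _ '[' pvT6 _ 5 (by decide) (by decide) (by decide))]
  rw [pvPeelBlock pvT5 ('[' :: pvW5) pvT6 (by decide) '[' _
        (pvNPB _ '[' pvT6 _ 5 (by decide) (by decide) (by decide))]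
  rw [pvRep_match]
  simp only [List.cons_append]
  rw [pvPeelBlock pvT7 ('[' :: pvW7) pvW6 (by decide) '[' _
        (pvNPB _ '[' pvW6 _ 1 (by decide) (by decide) (by decide))]

theorem pvScanStep6 (u : List Char) :
    pvScan ('[' :: (pvT6 ++ u)) = '[' :: (pvW6 ++ pvScan u) := by
  rw [pvScan_eq_some _ _ _ _ (pvFind6 u)]
  rw [show List.drop 25 ('[' :: (pvT6 ++ u)) = u from List.drop_left' (l₁ := '[' :: pvT6) (by decide)]
  rfl

theorem pvFind7 (u : List Char) :
    pvFindKey pvPairs ('[' :: (pvT7 ++ u)) = some ('[' :: pvW7, 13) := by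
  rw [pvPairs_eq]
  simp only [pvFindKey]
  rw [if_neg (pvNPB _ '[' pvT7 _ 5 (by decide) (by decide) (by decide))]
  rw [if_neg (pvNPB _ '[' pvT7 _ 5 (by decide) (by decide) (by decide))]
  rw [if_neg (pvNPB _ '[' pvT7 _ 5 (by decide) (by decide) (by decide))]
  rw [if_neg (pvNPB _ '[' pvT7 _ 5 (by decide) (by decide) (by decide))]
  rw [if_neg (pvNPB _ '[' pvT7 _ 5 (by decide) (by decide) (by decide))]
  rw [if_neg (pvNPB _ '[' pvT7 _ 5 (by decide) (by decide) (by decide))]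
  rw [if_pos (by rw [List.isPrefixOf_iff_prefix, List.cons_prefix_cons]; exact ⟨rfl, u, rfl⟩)]
  decide

theorem pvStep7 (u : List Char) :
    pvF ('[' :: (pvT7 ++ u)) = '[' :: (pvW7 ++ pvF u) := by
  unfold pvF
  rw [pvPeelBlock pvT1 ('[' :: pvW1) pvT7 (by decide) '[' _
        (pvNPB _ '[' pvT7 _ 5 (by decide) (by decide) (by decide))]
  rw [pvPeelBlock pvT2 ('[' :: pvW2) pvT7 (by decide) '[' _
        (pvNPB _ '[' pvT7 _ 5 (by decide) (by decide) (by decide))]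
  rw [pvPeelBlock pvT3 ('[' :: pvW3) pvT7 (by decide) '[' _
        (pvNPB _ '[' pvT7 _ 5 (by decide) (by decide) (by decide))]
  rw [pvPeelBlock pvT4 ('[' :: pvW4) pvT7 (by decide) '[' _
        (pvNPB _ '[' pvT7 _ 5 (by decide) (by decide) (by decide))]
  rw [pvPeelBlock pvT5 ('[' :: pvW5) pvT7 (by decide) '[' _
        (pvNPB _ '[' pvT7 _ 5 (by decide) (by decide) (by decide))]
  rw [pvPeelBlock pvT6 ('[' :: pvW6) pvT7 (by decide) '[' _
        (pvNPB _ '[' pvT7 _ 5 (by decide) (by decide) (by decide))]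
  rw [pvRep_match]
  simp only [List.cons_append]

theorem pvScanStep7 (u : List Char) :
    pvScan ('[' :: (pvT7 ++ u)) = '[' :: (pvW7 ++ pvScan u) := by
  rw [pvScan_eq_some _ _ _ _ (pvFind7 u)]
  rw [show List.drop 13 ('[' :: (pvT7 ++ u)) = u from List.drop_left' (l₁ := '[' :: pvT7) (by decide)]
  rfl

theorem pvFindNone (c : Char) (t : List Char)
    (f1 : ¬ ('[' :: pvT1).isPrefixOf (c :: t)) (f2 : ¬ ('[' :: pvT2).isPrefixOf (c :: t)) (f3 : ¬ ('[' :: pvT3).isPrefixOf (c :: t)) (f4 : ¬ ('[' :: pvT4).isPrefixOf (c :: t)) (f5 : ¬ ('[' :: pvT5).isPrefixOf (c :: t)) (f6 : ¬ ('[' :: pvT6).isPrefixOf (c :: t)) (f7 : ¬ ('[' :: pvT7).isPrefixOf (c :: t)) :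
    pvFindKey pvPairs (c :: t) = none := by
  rw [pvPairs_eq]
  simp only [pvFindKey]
  rw [if_neg f1, if_neg f2, if_neg f3, if_neg f4, if_neg f5, if_neg f6, if_neg f7]

theorem pvMain : ∀ (n : Nat) (l : List Char), l.length ≤ n → pvF l = pvScan l := by
  intro n
  induction n with
  | zero =>
    intro l hl
    have h0 : l = [] := List.length_eq_zero_iff.mp (Nat.le_zero.mp hl)
    subst h0; rw [pvF_nil, pvScan_nil]
  | succ n ih =>
    intro l hl
    cases l with
    | nil => rw [pvF_nil, pvScan_nil]
    | cons c t =>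
      by_cases h1 : ('[' :: pvT1).isPrefixOf (c :: t)
      · obtain ⟨u, hu⟩ := List.isPrefixOf_iff_prefix.mp h1
        have hlen := congrArg List.length hu
        have hT : pvT1.length = 9 := by decide
        simp only [List.length_cons, List.length_append, hT] at hlen hl
        rw [← hu]
        simp only [List.cons_append]
        rw [pvStep1, pvScanStep1, ih u (by omega)]
      by_cases h2 : ('[' :: pvT2).isPrefixOf (c :: t)
      · obtain ⟨u, hu⟩ := List.isPrefixOf_iff_prefix.mp h2
        have hlen := congrArg List.length hu
        have hT : pvT2.length = 10 := by decide
        simp only [List.length_cons, List.length_append, hT] at hlen hl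
        rw [← hu]
        simp only [List.cons_append]
        rw [pvStep2, pvScanStep2, ih u (by omega)]
      by_cases h3 : ('[' :: pvT3).isPrefixOf (c :: t)
      · obtain ⟨u, hu⟩ := List.isPrefixOf_iff_prefix.mp h3
        have hlen := congrArg List.length hu
        have hT : pvT3.length = 10 := by decide
        simp only [List.length_cons, List.length_append, hT] at hlen hl
        rw [← hu]
        simp only [List.cons_append]
        rw [pvStep3, pvScanStep3, ih u (by omega)]
      by_cases h4 : ('[' :: pvT4).isPrefixOf (c :: t)
      · obtain ⟨u, hu⟩ := List.isPrefixOf_iff_prefix.mp h4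
        have hlen := congrArg List.length hu
        have hT : pvT4.length = 8 := by decide
        simp only [List.length_cons, List.length_append, hT] at hlen hl
        rw [← hu]
        simp only [List.cons_append]
        rw [pvStep4, pvScanStep4, ih u (by omega)]
      by_cases h5 : ('[' :: pvT5).isPrefixOf (c :: t)
      · obtain ⟨u, hu⟩ := List.isPrefixOf_iff_prefix.mp h5
        have hlen := congrArg List.length hu
        have hT : pvT5.length = 24 := by decide
        simp only [List.length_cons, List.length_append, hT] at hlen hl
        rw [← hu]
        simp only [List.cons_append]
        rw [pvStep5, pvScanStep5, ih u (by omega)]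
      by_cases h6 : ('[' :: pvT6).isPrefixOf (c :: t)
      · obtain ⟨u, hu⟩ := List.isPrefixOf_iff_prefix.mp h6
        have hlen := congrArg List.length hu
        have hT : pvT6.length = 24 := by decide
        simp only [List.length_cons, List.length_append, hT] at hlen hl
        rw [← hu]
        simp only [List.cons_append]
        rw [pvStep6, pvScanStep6, ih u (by omega)]
      by_cases h7 : ('[' :: pvT7).isPrefixOf (c :: t)
      · obtain ⟨u, hu⟩ := List.isPrefixOf_iff_prefix.mp h7
        have hlen := congrArg List.length hu
        have hT : pvT7.length = 12 := by decide
        simp only [List.length_cons, List.length_append, hT] at hlen hl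
        rw [← hu]
        simp only [List.cons_append]
        rw [pvStep7, pvScanStep7, ih u (by omega)]
      simp only [List.length_cons] at hl
      rw [pvScan_eq_none _ _ (pvFindNone c t h1 h2 h3 h4 h5 h6 h7)]
      have hF := ih t (by omega)
      unfold pvF at hF ⊢
      by_cases hc : c = '['
      · subst hc
        rw [pvPeelOne pvT1 _ _ _ h1]
        rw [pvPeelOne pvT2 _ _ _ (pvStable pvT1 pvW1 pvT2 (by decide) _ (h2))]
        rw [pvPeelOne pvT3 _ _ _ (pvStable pvT2 pvW2 pvT3 (by decide) _ (pvStable pvT1 pvW1 pvT3 (by decide) _ (h3)))]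
        rw [pvPeelOne pvT4 _ _ _ (pvStable pvT3 pvW3 pvT4 (by decide) _ (pvStable pvT2 pvW2 pvT4 (by decide) _ (pvStable pvT1 pvW1 pvT4 (by decide) _ (h4))))]
        rw [pvPeelOne pvT5 _ _ _ (pvStable pvT4 pvW4 pvT5 (by decide) _ (pvStable pvT3 pvW3 pvT5 (by decide) _ (pvStable pvT2 pvW2 pvT5 (by decide) _ (pvStable pvT1 pvW1 pvT5 (by decide) _ (h5)))))]
        rw [pvPeelOne pvT6 _ _ _ (pvStable pvT5 pvW5 pvT6 (by decide) _ (pvStable pvT4 pvW4 pvT6 (by decide) _ (pvStable pvT3 pvW3 pvT6 (by decide) _ (pvStable pvT2 pvW2 pvT6 (by decide) _ (pvStable pvT1 pvW1 pvT6 (by decide) _ (h6))))))]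
        rw [pvPeelOne pvT7 _ _ _ (pvStable pvT6 pvW6 pvT7 (by decide) _ (pvStable pvT5 pvW5 pvT7 (by decide) _ (pvStable pvT4 pvW4 pvT7 (by decide) _ (pvStable pvT3 pvW3 pvT7 (by decide) _ (pvStable pvT2 pvW2 pvT7 (by decide) _ (pvStable pvT1 pvW1 pvT7 (by decide) _ (h7)))))))]
        rw [hF]
      · have hc' : ('[':Char) ≠ c := fun he => hc he.symm
        rw [pvPeelOne pvT1 _ _ _ (pvNotPrefix_of_get _ _ 0 (by simp) (by simpa using hc'))]
        rw [pvPeelOne pvT2 _ _ _ (pvNotPrefix_of_get _ _ 0 (by simp) (by simpa using hc'))]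
        rw [pvPeelOne pvT3 _ _ _ (pvNotPrefix_of_get _ _ 0 (by simp) (by simpa using hc'))]
        rw [pvPeelOne pvT4 _ _ _ (pvNotPrefix_of_get _ _ 0 (by simp) (by simpa using hc'))]
        rw [pvPeelOne pvT5 _ _ _ (pvNotPrefix_of_get _ _ 0 (by simp) (by simpa using hc'))]
        rw [pvPeelOne pvT6 _ _ _ (pvNotPrefix_of_get _ _ 0 (by simp) (by simpa using hc'))]
        rw [pvPeelOne pvT7 _ _ _ (pvNotPrefix_of_get _ _ 0 (by simp) (by simpa using hc'))]
        rw [hF]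

theorem pvB_scan_eq (l : List Char) : pvF l = pvScan l :=
  pvMain l.length l le_rfl

-- ===== VERDICT (by name: the statement is the Claim_ definition above) =====
theorem customize_pii_markers_spec : Claim_equal_customize_pii_markers := by
  intro t _
  unfold Spec_customize_pii_markers customize_pii_markers_alt
  rw [← pvB_scan_eq, ← pvA_toList, String.ofList_toList]
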